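-- pv_equiv track=rewrite | github.com/zhangliu463884153/BlockCipher | Demo Sbox linear cryptanalysis.py | FindParity
-- ===== SOURCE A (Python) =====
-- def FindParity(x, y):
--     maskedValue = x & y
--
--     parity = 0
--     while maskedValue > 0:
--         extractionBinaire =  maskedValue % 2
--         maskedValue //= 2
--         parity = parity ^ extractionBinaire
--
--     return parity
-- ===== SOURCE B (Python) =====
-- def FindParity(x, y):
--     m = x & y
--     return bin(m).count('1') % 2 if m > 0 else 0
-- ===== Notes on version B (the rewrite author's own statement) =====
-- stated objective: idiomatic
-- what changed: The explicit bit-extraction while-loop is replaced by a single popcount over the binary representation (bin(m).count('1') % 2), with 0 for non-positive masked values as in A.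
import Mathlib
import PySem

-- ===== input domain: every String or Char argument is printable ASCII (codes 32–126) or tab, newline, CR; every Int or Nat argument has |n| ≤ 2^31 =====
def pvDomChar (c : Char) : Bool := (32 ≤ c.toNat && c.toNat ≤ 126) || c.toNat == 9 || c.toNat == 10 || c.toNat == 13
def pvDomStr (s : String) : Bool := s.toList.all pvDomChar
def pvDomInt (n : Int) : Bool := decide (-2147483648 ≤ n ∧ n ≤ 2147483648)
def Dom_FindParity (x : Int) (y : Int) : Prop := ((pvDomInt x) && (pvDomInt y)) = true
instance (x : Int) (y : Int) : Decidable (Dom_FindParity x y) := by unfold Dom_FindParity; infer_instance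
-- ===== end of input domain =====

-- B replaces A's bit-extraction while-loop by a single popcount of the masked value
-- (parity = popcount mod 2, with 0 for a non-positive mask as in A); objective: idiomatic.

-- ===== PORT A =====
-- the while-loop of A: state (maskedValue, parity), one step per iteration
def FindParityLoop (maskedValue : Int) (parity : Int) : Int :=
  if h : 0 < maskedValue then
    FindParityLoop (PySem.Int.floordiv maskedValue 2)
      (PySem.Int.bxor parity (PySem.Int.mod maskedValue 2))
  else parity
termination_by maskedValue.toNat
decreasing_by
  have h2 : PySem.Int.floordiv maskedValue 2 = maskedValue / 2 :=
    PySem.Int.floordiv_eq_ediv_of_pos (by omega)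
  rw [h2]; omega

def FindParity (x : Int) (y : Int) : Int :=
  FindParityLoop (PySem.Int.band x y) 0

-- ===== PORT B =====
-- bin(m).count('1') is ported as PySem.Int.bitCount m (exact: for 0 < m both count the set bits)
def FindParity_alt (x : Int) (y : Int) : Int :=
  let m := PySem.Int.band x y
  if 0 < m then ((PySem.Int.bitCount m % 2 : Nat) : Int) else 0

-- ===== PRECONDITION & SPEC =====
def Spec_FindParity (x : Int) (y : Int) (out : Int) : Prop := out = FindParity_alt x y
instance (x : Int) (y : Int) (out : Int) : Decidable (Spec_FindParity x y out) := by unfold Spec_FindParity; infer_instance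

-- ===== CLAIM (what is proved, stated in full; the proofs are below) =====
def Claim_equal_FindParity : Prop := ∀ (x : Int) (y : Int), Dom_FindParity x y → Spec_FindParity x y (FindParity x y)

-- ===== LEMMAS AND PROOFS =====

-- loop invariant: for a positive mask and a parity bit in {0,1}, the loop returns
-- (parity + popcount of the mask) mod 2
theorem findParityLoop_pos (n : Nat) : ∀ (m p : Int), m.toNat = n → 0 < m → (p = 0 ∨ p = 1) →
    FindParityLoop m p = (((p.toNat + PySem.Int.bitCount m) % 2 : Nat) : Int) := by
  induction n using Nat.strong_induction_on with
  | _ n ih =>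
    intro m p hn hm hp
    rw [FindParityLoop, dif_pos hm]
    have hfd : PySem.Int.floordiv m 2 = m / 2 := PySem.Int.floordiv_eq_ediv_of_pos (by omega)
    have hmod : PySem.Int.mod m 2 = m % 2 := PySem.Int.mod_eq_emod_of_pos (by omega)
    have hbc := PySem.Int.bitCount_of_pos (n := m) hm
    rw [hfd, hmod] at *
    set p' := PySem.Int.bxor p (m % 2) with hp'
    have hbit : (m % 2 = 0 ∧ p' = p) ∨ (m % 2 = 1 ∧ p' = PySem.Int.bxor p 1) := by
      rcases Int.emod_two_eq_zero_or_one m with he | he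
      · exact Or.inl ⟨he, by rw [hp', he, PySem.Int.bxor_zero]⟩
      · exact Or.inr ⟨he, by rw [hp', he]⟩
    have hp'01 : p' = 0 ∨ p' = 1 := by
      rcases hbit with ⟨_, h⟩ | ⟨_, h⟩ <;> rcases hp with hpv | hpv <;> rw [h, hpv] <;> decide
    by_cases h2 : 0 < m / 2
    · rw [ih (m / 2).toNat (by omega) (m / 2) p' rfl h2 hp'01]
      congr 1
      rcases hbit with ⟨he, h⟩ | ⟨he, h⟩ <;> rcases hp with hpv | hpv <;>
        · rw [hbc, he, h, hpv]
          first | rw [show PySem.Int.bxor 0 1 = 1 from by decide]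
                | rw [show PySem.Int.bxor 1 1 = 0 from by decide]
                | skip
          omega
    · have hm1 : m = 1 := by omega
      rw [FindParityLoop, dif_neg (by omega : ¬ 0 < m / 2)]
      rw [hp']
      subst hm1
      rcases hp with hpv | hpv <;> subst hpv <;> decide

theorem FindParity_spec : Claim_equal_FindParity := by
  unfold Claim_equal_FindParity Spec_FindParity FindParity FindParity_alt
  intro x y _
  set m := PySem.Int.band x y with hm
  by_cases h : 0 < m
  · simp only [if_pos h]
    rw [findParityLoop_pos m.toNat m 0 rfl h (Or.inl rfl)]
    norm_num
  · simp only [if_neg h]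
    rw [FindParityLoop, dif_neg h]
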